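-- pv_equiv track=rewrite | github.com/pombase/genome_changelog | get_info_from_changes.py | agg_function
-- ===== SOURCE A (Python) =====
-- def agg_function(x):
--     category_list = list(x)
--     if len(category_list) == 1:
--         return category_list[0]
--
--     all_added = all('added' in category for category in category_list)
--     all_removed = all('removed' in category for category in category_list)
--     any_changed = any('changed' in category for category in category_list)
--     any_removed = any('removed' in category for category in category_list)
--
--     if all_removed:
--         if all_added:
--             return 'added_changed_and_removed' if (any_changed or any_removed) else 'added_and_removed'
--         else:
--             return 'changed_and_removed' if (any_changed or any_removed) else 'removed'
--     else:
--         if all_added: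
--             return 'added_and_changed' if (any_changed or any_removed) else 'added'
--         else:
--             if (any_changed or any_removed):
--                 return 'changed'
--
--     raise ValueError('This should not happen')
-- ===== SOURCE B (Python) =====
-- def agg_function(x):
--     cats = list(x)
--     if len(cats) == 1:
--         return cats[0]
--     common = {'added', 'removed'}
--     seen = False
--     for c in cats:
--         common = {k for k in common if k in c}
--         seen = seen or 'changed' in c or 'removed' in c
--     parts = []
--     if 'added' in common:
--         parts.append('added')
--     if seen:
--         parts.append('changed')
--     if 'removed' in common:
--         parts.append('removed')
--     if not parts:
--         raise ValueError('This should not happen')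
--     if len(parts) == 1:
--         return parts[0]
--     return '_'.join(parts[:-1]) + '_and_' + parts[-1]
-- ===== Notes on version B (the rewrite author's own statement) =====
-- stated objective: simpler
-- what changed: Instead of a nested if/else tree over four all/any predicates with seven hard-coded result strings, B does one fold that intersects a set of kinds common to every category and raises a changed/removed flag, then assembles the label compositionally by joining the present component words with '_' and a final '_and_'.
import Mathlib
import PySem

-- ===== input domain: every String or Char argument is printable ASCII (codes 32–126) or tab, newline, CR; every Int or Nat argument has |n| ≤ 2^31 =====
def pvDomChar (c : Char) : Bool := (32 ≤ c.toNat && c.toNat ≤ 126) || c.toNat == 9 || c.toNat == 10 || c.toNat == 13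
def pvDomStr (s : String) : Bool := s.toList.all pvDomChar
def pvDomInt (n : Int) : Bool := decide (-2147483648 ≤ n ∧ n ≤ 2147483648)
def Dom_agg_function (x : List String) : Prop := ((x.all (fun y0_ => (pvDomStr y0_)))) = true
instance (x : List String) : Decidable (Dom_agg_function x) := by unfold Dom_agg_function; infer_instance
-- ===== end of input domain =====

-- B builds the label compositionally: one fold shrinks a common-kind set and raises a flag, then the parts are joined with '_' and '_and_' — simpler, no hard-coded branch tree.


-- ===== PORT A =====
-- literal port of A; in the unreachable 'raise ValueError' branch (excluded by Pre_) it returns ""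
def agg_function (x : List String) : String :=
  let category_list := x
  if category_list.length == 1 then
    (PySem.List.pyGet? category_list 0).getD ""
  else
    let all_added := category_list.all (fun c => PySem.Str.isIn "added" c)
    let all_removed := category_list.all (fun c => PySem.Str.isIn "removed" c)
    let any_changed := category_list.any (fun c => PySem.Str.isIn "changed" c)
    let any_removed := category_list.any (fun c => PySem.Str.isIn "removed" c)
    if all_removed then
      if all_added then
        (if any_changed || any_removed then "added_changed_and_removed" else "added_and_removed")
      else
        (if any_changed || any_removed then "changed_and_removed" else "removed")
    else
      if all_added then
        (if any_changed || any_removed then "added_and_changed" else "added")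
      else
        if any_changed || any_removed then "changed"
        else ""  -- raise ValueError('This should not happen')

-- ===== PORT B =====
-- the set comprehension {k for k in common if k in c} is ported as a filter on the Set's element
-- list (exact: the result is only consumed by membership tests, never through Python's hash order)
def agg_function_alt (x : List String) : String :=
  let cats := x
  if cats.length == 1 then
    (PySem.List.pyGet? cats 0).getD ""
  else
    let st := cats.foldl
      (fun (st : PySem.Set String × Bool) c =>
        (st.1.filter (fun k => PySem.Str.isIn k c),
         st.2 || (PySem.Str.isIn "changed" c || PySem.Str.isIn "removed" c)))
      (PySem.Set.ofList ["added", "removed"], false)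
    let parts : List String :=
      (if PySem.Set.contains st.1 "added" then ["added"] else []) ++
      (if st.2 then ["changed"] else []) ++
      (if PySem.Set.contains st.1 "removed" then ["removed"] else [])
    match parts with
    | [] => ""  -- raise ValueError('This should not happen')
    | [p] => p
    | _ => PySem.Str.join "_" parts.dropLast ++ "_and_" ++ (parts.getLast?.getD "")

-- ===== PRECONDITION & SPEC =====
-- Pre_ excludes exactly the inputs on which A raises ValueError (len ≠ 1, not all 'added',
-- not all 'removed', and no element containing 'changed' or 'removed'); B raises there too.
def Pre_agg_function (x : List String) : Prop :=
  x.length = 1 ∨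
  x.all (fun c => PySem.Str.isIn "added" c) = true ∨
  x.all (fun c => PySem.Str.isIn "removed" c) = true ∨
  x.any (fun c => PySem.Str.isIn "changed" c || PySem.Str.isIn "removed" c) = true
instance (x : List String) : Decidable (Pre_agg_function x) := by unfold Pre_agg_function; infer_instance
def pvWitness_agg_function : List String := ["added", "added_and_removed"]
def Spec_agg_function (x : List String) (out : String) : Prop := out = agg_function_alt x
instance (x : List String) (out : String) : Decidable (Spec_agg_function x out) := by unfold Spec_agg_function; infer_instance

-- ===== CLAIM =====
def Claim_equal_agg_function : Prop := ∀ (x : List String), Dom_agg_function x → Pre_agg_function x → Spec_agg_function x (agg_function x)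

-- ===== LEMMAS AND PROOFS =====
theorem fold_closed (cats : List String) (l : List String) (b : Bool) :
    cats.foldl
      (fun (st : PySem.Set String × Bool) c =>
        (st.1.filter (fun k => PySem.Str.isIn k c),
         st.2 || (PySem.Str.isIn "changed" c || PySem.Str.isIn "removed" c)))
      (l, b)
    = (l.filter (fun k => cats.all (fun c => PySem.Str.isIn k c)),
       b || cats.any (fun c => PySem.Str.isIn "changed" c || PySem.Str.isIn "removed" c)) := by
  induction cats generalizing l b with
  | nil => simp
  | cons c cs ih =>
    simp only [List.foldl_cons, List.all_cons, List.any_cons, ih, List.filter_filter, Prod.mk.injEq]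
    constructor
    · apply List.filter_congr; intro k _; simp [Bool.and_comm]
    · simp [Bool.or_assoc]

theorem any_or_split (x : List String) (p q : String → Bool) :
    (x.any p || x.any q) = x.any (fun c => p c || q c) := by
  rw [Bool.eq_iff_iff]
  simp only [Bool.or_eq_true, List.any_eq_true]
  aesop

theorem agg_eq (x : List String) : agg_function x = agg_function_alt x := by
  unfold agg_function agg_function_alt
  by_cases h1 : x.length == 1
  · simp [h1]
  · simp only [h1, Bool.false_eq_true, if_false]
    rw [show (PySem.Set.ofList ["added", "removed"] : PySem.Set String) = ["added", "removed"] from rfl,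
        fold_closed, ← any_or_split]
    cases hr : x.all (fun c => PySem.Str.isIn "removed" c) <;>
      cases ha : x.all (fun c => PySem.Str.isIn "added" c) <;>
        cases hc : x.any (fun c => PySem.Str.isIn "changed" c) <;>
          cases hm : x.any (fun c => PySem.Str.isIn "removed" c) <;>
            (simp only [List.filter_cons, List.filter_nil, hr, ha, hc, hm, Bool.false_or,
              Bool.or_false, Bool.true_or, Bool.or_true, if_true, if_false]; decide)

-- ===== VERDICT =====
theorem agg_function_spec : Claim_equal_agg_function := by
  intro x _ _
  exact agg_eq x
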